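-- pv_equiv track=rewrite | github.com/code-sss/haiguru | etl_pipeline/parse_exercises.py | _extract_passage
-- ===== SOURCE A (Python) =====
-- def _extract_passage(block: str) -> str | None:
--     """Extract the passage text from a ### PARAGRAPH block (supports multi-line)."""
--     passage_lines = []
--     in_passage = False
--     for line in block.splitlines():
--         stripped = line.strip()
--         if stripped.startswith("Passage:"):
--             passage_lines.append(stripped[len("Passage:"):].strip())
--             in_passage = True
--         elif in_passage and stripped:
--             passage_lines.append(stripped)
--     return " ".join(passage_lines).strip() if passage_lines else None
-- ===== SOURCE B (Python) =====
-- def _extract_passage(block: str) -> str | None: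
--     """Extract the passage text from a ### PARAGRAPH block (supports multi-line)."""
--     lines = block.splitlines()
--     start = next((i for i, ln in enumerate(lines)
--                   if ln.strip().startswith("Passage:")), None)
--     if start is None:
--         return None
--     parts = [s[len("Passage:"):].strip() if s.startswith("Passage:") else s
--              for s in (ln.strip() for ln in lines[start:])
--              if s.startswith("Passage:") or s]
--     return " ".join(parts).strip()
-- ===== Notes on version B (the rewrite author's own statement) =====
-- stated objective: idiomatic
-- what changed: Replaces the stateful in_passage flag loop by locating the first passage-marker line with next() over a generator and then building the parts with a single filter-map comprehension over the suffix of lines.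
import Mathlib
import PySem

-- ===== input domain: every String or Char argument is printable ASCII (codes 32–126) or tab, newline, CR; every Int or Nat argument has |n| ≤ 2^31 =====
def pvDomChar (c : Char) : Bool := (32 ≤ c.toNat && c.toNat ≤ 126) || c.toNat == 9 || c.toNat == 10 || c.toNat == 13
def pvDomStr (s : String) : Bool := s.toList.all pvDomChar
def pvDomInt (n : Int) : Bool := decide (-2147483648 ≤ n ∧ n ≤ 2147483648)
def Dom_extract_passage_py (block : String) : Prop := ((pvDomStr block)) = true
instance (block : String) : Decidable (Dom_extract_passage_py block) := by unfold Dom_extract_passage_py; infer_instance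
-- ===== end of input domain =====

-- B replaces A's stateful in_passage-flag loop by a find-first-index plus a filter-map over the suffix (idiomatic; same cost).

-- ===== PORT A =====
-- loop body of A: state = (passage_lines, in_passage)
def paStep (st : List String × Bool) (line : String) : List String × Bool :=
  let stripped := PySem.Str.strip line
  if PySem.Str.startswith stripped "Passage:" then
    (st.1 ++ [PySem.Str.strip (PySem.Str.slice stripped (some 8) none)], true)
  else if st.2 = true ∧ stripped ≠ "" then
    (st.1 ++ [stripped], st.2)
  else st

def extract_passage_py (block : String) : Option String :=
  let r := (PySem.Str.splitlines block).foldl paStep ([], false)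
  if r.1 ≠ [] then some (PySem.Str.strip (PySem.Str.join " " r.1)) else none

-- ===== PORT B =====
def pbIsPassage (ln : String) : Bool :=
  PySem.Str.startswith (PySem.Str.strip ln) "Passage:"

-- the comprehension's filter+map on one line
def pbMap (ln : String) : Option String :=
  let s := PySem.Str.strip ln
  if PySem.Str.startswith s "Passage:" then
    some (PySem.Str.strip (PySem.Str.slice s (some 8) none))
  else if s ≠ "" then some s else none

def extract_passage_py_alt (block : String) : Option String :=
  let lines := PySem.Str.splitlines block
  match lines.findIdx? pbIsPassage with
  | none => none
  | some start =>
      some (PySem.Str.strip (PySem.Str.join " " ((lines.drop start).filterMap pbMap)))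

-- ===== PRECONDITION & SPEC =====
def Spec_extract_passage_py (block : String) (out : Option String) : Prop := out = extract_passage_py_alt block
instance (block : String) (out : Option String) : Decidable (Spec_extract_passage_py block out) := by unfold Spec_extract_passage_py; infer_instance

-- ===== CLAIM (what is proved, stated in full; the proofs are below) =====
def Claim_equal_extract_passage_py : Prop := ∀ (block : String), Dom_extract_passage_py block → Spec_extract_passage_py block (extract_passage_py block)

-- ===== LEMMAS AND PROOFS =====

theorem pbMap_pos (ln : String)
    (h : PySem.Str.startswith (PySem.Str.strip ln) "Passage:" = true) :
    pbMap ln = some (PySem.Str.strip (PySem.Str.slice (PySem.Str.strip ln) (some 8) none)) := by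
  simp only [pbMap, h, if_true]

theorem pbMap_blank (ln : String)
    (_h : PySem.Str.startswith (PySem.Str.strip ln) "Passage:" = false)
    (hs : PySem.Str.strip ln = "") : pbMap ln = none := by
  simp only [pbMap, hs]
  decide

theorem pbMap_other (ln : String)
    (h : PySem.Str.startswith (PySem.Str.strip ln) "Passage:" = false)
    (hs : PySem.Str.strip ln ≠ "") : pbMap ln = some (PySem.Str.strip ln) := by
  simp only [pbMap, h, Bool.false_eq_true, if_false, hs, ne_eq, not_false_eq_true, ite_true]

theorem paStep_pos (st : List String × Bool) (ln : String)
    (h : PySem.Str.startswith (PySem.Str.strip ln) "Passage:" = true) :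
    paStep st ln = (st.1 ++ [PySem.Str.strip (PySem.Str.slice (PySem.Str.strip ln) (some 8) none)], true) := by
  simp only [paStep, h, if_true]

theorem paStep_blank (st : List String × Bool) (ln : String)
    (_h : PySem.Str.startswith (PySem.Str.strip ln) "Passage:" = false)
    (hs : PySem.Str.strip ln = "") : paStep st ln = st := by
  simp only [paStep, hs,
    show PySem.Str.startswith "" "Passage:" = false from by decide,
    Bool.false_eq_true, if_false, ne_eq, not_true_eq_false, and_false]

theorem paStep_other_true (l : List String) (ln : String)
    (h : PySem.Str.startswith (PySem.Str.strip ln) "Passage:" = false)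
    (hs : PySem.Str.strip ln ≠ "") : paStep (l, true) ln = (l ++ [PySem.Str.strip ln], true) := by
  simp only [paStep, h, Bool.false_eq_true, if_false, ne_eq, hs, not_false_eq_true, and_true, ite_true]

theorem paStep_false (l : List String) (ln : String)
    (h : PySem.Str.startswith (PySem.Str.strip ln) "Passage:" = false) :
    paStep (l, false) ln = (l, false) := by
  simp only [paStep, h, Bool.false_eq_true, if_false]
  split <;> simp_all

-- once the flag is true, A's loop appends exactly the filter-mapped lines
theorem foldl_paStep_true (lines : List String) (acc : List String) :
    lines.foldl paStep (acc, true) = (acc ++ lines.filterMap pbMap, true) := by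
  induction lines generalizing acc with
  | nil => simp
  | cons ln ls ih =>
    simp only [List.foldl_cons, List.filterMap_cons]
    by_cases h : PySem.Str.startswith (PySem.Str.strip ln) "Passage:" = true
    · rw [paStep_pos _ _ h, pbMap_pos _ h, ih]
      simp
    · rw [Bool.not_eq_true] at h
      by_cases hs : PySem.Str.strip ln = ""
      · rw [paStep_blank _ _ h hs, pbMap_blank _ h hs, ih]
      · rw [paStep_other_true _ _ h hs, pbMap_other _ h hs, ih]
        simp

-- the combined characterisation of both ports' cores
set_option maxHeartbeats 1000000 in
theorem key (lines : List String) :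
    (if (lines.foldl paStep ([], false)).1 ≠ [] then
       some (PySem.Str.strip (PySem.Str.join " " (lines.foldl paStep ([], false)).1)) else none)
    = (match lines.findIdx? pbIsPassage with
       | none => none
       | some start =>
           some (PySem.Str.strip (PySem.Str.join " " ((lines.drop start).filterMap pbMap)))) := by
  induction lines with
  | nil => simp
  | cons ln ls ih =>
    by_cases h : pbIsPassage ln = true
    · have h' : PySem.Str.startswith (PySem.Str.strip ln) "Passage:" = true := h
      simp only [List.findIdx?_cons, h, List.foldl_cons]
      rw [paStep_pos _ _ h']
      simp only [List.nil_append]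
      rw [foldl_paStep_true]
      dsimp only
      simp only [List.singleton_append, if_true]
      rw [if_pos (List.cons_ne_nil _ _)]
      simp only [List.drop_zero, List.filterMap_cons]
      rw [pbMap_pos _ h']
    · have hb : pbIsPassage ln = false := by simpa using h
      have h' : PySem.Str.startswith (PySem.Str.strip ln) "Passage:" = false := hb
      simp only [List.findIdx?_cons, hb, List.foldl_cons]
      rw [paStep_false _ _ h']
      rw [ih]
      cases hfi : ls.findIdx? pbIsPassage with
      | none => simp
      | some i => simp

-- ===== VERDICT (by name: the statement is the Claim_ definition above) =====
theorem extract_passage_py_spec : Claim_equal_extract_passage_py := by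
  intro block _
  unfold Spec_extract_passage_py extract_passage_py extract_passage_py_alt
  exact key (PySem.Str.splitlines block)
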